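-- pv_equiv track=rewrite | github.com/kimhyeongjun95/AlgoPullgo | 019주차/불량 사용자/hyunseo.py | solution
-- ===== SOURCE A (Python) =====
-- def is_same(id1, id2):
--     for i in range(len(id1)):
--         if id1[i] == '*':
--             pass
--         elif id1[i] != id2[i]:
--             return False
--
--     return True
--
-- def solution(user_id, banned_id):
--     able_banned = []
--     for b_id in banned_id:
--         temp = []
--         for u_id in user_id:
--             if len(b_id) == len(u_id) and is_same(b_id, u_id):
--                 temp.append(u_id)
--         able_banned.append(temp)
--
--     N = len(able_banned)
--     answer = []
--
--     def pick_id(n, temp):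
--         if n == N:
--             temp.sort()
--             if temp not in answer:
--                 answer.append(temp)
--             return
--
--         for id in able_banned[n]:
--             if n == 0:
--                 pick_id(n+1, [id])
--             elif id not in temp:
--                 pick_id(n+1, temp+[id])
--
--     pick_id(0, [])
--
--     return len(answer)
-- ===== SOURCE B (Python) =====
-- def solution(user_id, banned_id):
--     able_banned = [
--         [u for u in user_id
--          if len(u) == len(b) and all(p == '*' or p == c for p, c in zip(b, u))]
--         for b in banned_id
--     ]
--     tuples = [()]
--     for cand in able_banned:
--         tuples = [t + (u,) for t in tuples for u in cand if u not in t]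
--     return len({tuple(sorted(t)) for t in tuples})
-- ===== Notes on version B (the rewrite author's own statement) =====
-- stated objective: idiomatic
-- what changed: Replaces the recursive backtracking pick_id with a mutable answer list (membership-tested sorted lists) by an iterative level-by-level product built with comprehensions plus a final set of sorted tuples for deduplication; wildcard matching becomes zip/all instead of an index loop.
import Mathlib
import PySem

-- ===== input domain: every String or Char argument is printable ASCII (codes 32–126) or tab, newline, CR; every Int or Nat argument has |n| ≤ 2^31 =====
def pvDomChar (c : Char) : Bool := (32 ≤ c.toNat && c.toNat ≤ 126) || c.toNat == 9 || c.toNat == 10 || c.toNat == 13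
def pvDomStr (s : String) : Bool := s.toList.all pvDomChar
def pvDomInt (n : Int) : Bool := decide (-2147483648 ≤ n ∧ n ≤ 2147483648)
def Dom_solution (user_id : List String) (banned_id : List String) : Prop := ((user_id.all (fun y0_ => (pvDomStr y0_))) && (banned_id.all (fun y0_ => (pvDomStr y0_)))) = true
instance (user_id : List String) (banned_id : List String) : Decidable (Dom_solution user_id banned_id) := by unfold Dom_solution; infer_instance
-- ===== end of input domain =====

-- B: iterative level-by-level product with comprehensions + set-of-sorted-tuples dedup, replacing A's
-- recursive backtracking with a membership-tested answer list (idiomatic decomposition; same results).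


-- ===== PORT A =====
-- is_same(id1, id2): index loop ported as the obvious simultaneous structural recursion over the
-- two character lists (A only calls it with equal lengths, so id2[i] never raises).
def isSame : List Char → List Char → Bool
  | [], _ => true
  | _ :: _, [] => true
  | c1 :: t1, c2 :: t2 =>
    if c1 = '*' then isSame t1 t2
    else if c1 ≠ c2 then false
    else isSame t1 t2

-- pick_id(n, temp), with the mutated `answer` threaded as state.  Python's guard is `n == N`;
-- it is written here as `n < N` (same test on every reachable call, since n only steps 0,1,…,N)
-- purely so the recursion is visibly terminating.
def pickId (able : List (List String)) (N : Nat) (n : Nat) (temp : List String)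
    (answer : List (List String)) : List (List String) :=
  if _h : n < N then
    (able.getD n []).foldl (fun acc id =>
      if n == 0 then pickId able N (n + 1) [id] acc
      else if temp.contains id then acc
      else pickId able N (n + 1) (temp ++ [id]) acc) answer
  else
    let t := PySem.List.sorted temp (fun x => x) false
    if answer.contains t then answer else answer ++ [t]
termination_by N - n

def solution (user_id : List String) (banned_id : List String) : Int :=
  let able_banned := banned_id.foldl (fun acc b_id =>
    acc ++ [user_id.foldl (fun temp u_id =>
      if PySem.Str.len b_id == PySem.Str.len u_id && isSame b_id.toList u_id.toList
      then temp ++ [u_id] else temp) []]) []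
  let N := able_banned.length
  ((pickId able_banned N 0 [] []).length : Int)

-- ===== PORT B =====
-- all(p == '*' or p == c for p, c in zip(b, u))
def matchWild (b u : List Char) : Bool :=
  (b.zip u).all (fun pc => pc.1 == '*' || pc.1 == pc.2)

def solution_alt (user_id : List String) (banned_id : List String) : Int :=
  let able_banned := banned_id.map (fun b =>
    user_id.filter (fun u => PySem.Str.len u == PySem.Str.len b && matchWild b.toList u.toList))
  let tuples := able_banned.foldl (fun ts cand =>
    ts.flatMap (fun t => (cand.filter (fun u => !t.contains u)).map (fun u => t ++ [u]))) [[]]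
  ((PySem.Set.ofList (tuples.map (fun t => PySem.List.sorted t (fun x => x) false))).length : Int)

-- ===== PRECONDITION & SPEC =====
def Spec_solution (user_id : List String) (banned_id : List String) (out : Int) : Prop := out = solution_alt user_id banned_id
instance (user_id : List String) (banned_id : List String) (out : Int) : Decidable (Spec_solution user_id banned_id out) := by unfold Spec_solution; infer_instance

-- ===== CLAIM (what is proved, stated in full; the proofs are below) =====
def Claim_equal_solution : Prop := ∀ (user_id : List String) (banned_id : List String), Dom_solution user_id banned_id → Spec_solution user_id banned_id (solution user_id banned_id)

-- ===== LEMMAS AND PROOFS =====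

-- the valid completions of a partial pick `temp` through the remaining candidate lists, in DFS order
def leaves : List (List String) → List String → List (List String)
  | [], temp => [temp]
  | c :: rest, temp =>
    (c.filter (fun u => !temp.contains u)).flatMap (fun u => leaves rest (temp ++ [u]))

theorem isSame_eq_matchWild (b u : List Char) : isSame b u = matchWild b u := by
  induction b generalizing u with
  | nil => cases u <;> simp [isSame, matchWild]
  | cons c t ih =>
    cases u with
    | nil => simp [isSame, matchWild]
    | cons c2 t2 =>
      simp only [isSame, matchWild, List.zip_cons_cons, List.all_cons]
      by_cases h1 : c = '*'
      · simp [h1, ih t2, matchWild]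
      · by_cases h2 : c = c2 <;> simp [h1, h2, ih t2, matchWild]

theorem foldl_if_flatMap {α β γ : Type} (c : List α) (p : α → Bool) (L : α → List β)
    (ins : γ → β → γ) (F : α → γ → γ) (hF : ∀ x acc, p x = true → F x acc = (L x).foldl ins acc)
    (answer : γ) :
    c.foldl (fun acc x => if p x then F x acc else acc) answer
      = ((c.filter p).flatMap L).foldl ins answer := by
  induction c generalizing answer with
  | nil => rfl
  | cons x c ih =>
    by_cases hx : p x = true
    · rw [List.foldl_cons, if_pos hx, hF x answer hx, ih,
        List.filter_cons_of_pos hx, List.flatMap_cons, List.foldl_append]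
    · rw [List.foldl_cons, if_neg hx, ih, List.filter_cons_of_neg (by simpa using hx)]

-- one dedup-insertion step of A's answer list
def insS (acc : List (List String)) (t : List String) : List (List String) :=
  let s := PySem.List.sorted t (fun x => x) false
  if acc.contains s then acc else acc ++ [s]

theorem pickId_eq_leaves (able : List (List String)) :
    ∀ (rest : List (List String)) (n : Nat) (temp : List String)
      (answer : List (List String)),
      able.drop n = rest → (n = 0 → temp = []) →
      pickId able able.length n temp answer = (leaves rest temp).foldl insS answer := by
  intro rest
  induction rest with
  | nil =>
    intro n temp answer hdrop _
    have hn : ¬ n < able.length := by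
      have := List.drop_eq_nil_iff.mp hdrop; omega
    unfold pickId
    simp [hn, leaves, insS]
  | cons c rest ih =>
    intro n temp answer hdrop h0
    have hn : n < able.length := by
      by_contra hn
      rw [List.drop_eq_nil_of_le (by omega)] at hdrop
      simp at hdrop
    have hget : able.getD n [] = c := by
      have hg : able[n]? = some c := by
        rw [← Nat.add_zero n, ← List.getElem?_drop, hdrop]
        rfl
      rw [List.getD_eq_getElem?_getD, hg]
      rfl
    have hdrop' : able.drop (n + 1) = rest := by
      rw [← List.tail_drop, hdrop]
      rfl
    unfold pickId
    rw [dif_pos hn, hget]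
    by_cases hz : n = 0
    · subst hz
      have htemp : temp = [] := h0 rfl
      subst htemp
      simp only [beq_self_eq_true, if_true, leaves]
      have := foldl_if_flatMap c (fun u => !List.contains ([] : List String) u)
          (fun u => leaves rest ([] ++ [u])) insS
          (fun id acc => pickId able able.length (0 + 1) [id] acc)
          (fun id acc _ => by
            simpa using ih (0 + 1) [id] acc hdrop' (by omega)) answer
      simpa using this
    · have hzb : (n == 0) = false := by simpa using hz
      simp only [hzb, Bool.false_eq_true, if_false, leaves]
      have hswap : (fun (acc : List (List String)) (id : String) =>
            if temp.contains id then acc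
            else pickId able able.length (n + 1) (temp ++ [id]) acc)
          = (fun acc id => if (!temp.contains id) then
              pickId able able.length (n + 1) (temp ++ [id]) acc else acc) := by
        funext acc id
        cases temp.contains id <;> simp
      rw [hswap]
      exact foldl_if_flatMap c (fun u => !temp.contains u)
        (fun u => leaves rest (temp ++ [u])) insS
        (fun id acc => pickId able able.length (n + 1) (temp ++ [id]) acc)
        (fun id acc _ => ih (n + 1) (temp ++ [id]) acc hdrop' (by omega)) answer

theorem foldl_step_eq_flatMap_leaves :
    ∀ (ls : List (List String)) (ts : List (List String)),
      ls.foldl (fun ts cand =>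
          ts.flatMap (fun t => (cand.filter (fun u => !t.contains u)).map (fun u => t ++ [u]))) ts
        = ts.flatMap (fun t => leaves ls t) := by
  intro ls
  induction ls with
  | nil => intro ts; simp [leaves]
  | cons c ls ih =>
    intro ts
    rw [List.foldl_cons, ih, List.flatMap_assoc]
    congr 1
    funext t
    simp only [leaves, List.flatMap_map]

theorem foldl_insS_eq_ofList (L : List (List String)) :
    L.foldl insS [] = PySem.Set.ofList (L.map (fun t => PySem.List.sorted t (fun x => x) false)) := by
  show _ = (L.map (fun t => PySem.List.sorted t (fun x => x) false)).foldl PySem.Set.add PySem.Set.empty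
  rw [List.foldl_map]
  rfl

theorem able_eq (user_id banned_id : List String) :
    banned_id.foldl (fun acc b_id =>
      acc ++ [user_id.foldl (fun temp u_id =>
        if PySem.Str.len b_id == PySem.Str.len u_id && isSame b_id.toList u_id.toList
        then temp ++ [u_id] else temp) []]) []
    = banned_id.map (fun b =>
      user_id.filter (fun u => PySem.Str.len u == PySem.Str.len b && matchWild b.toList u.toList)) := by
  rw [PySem.List.foldl_append_singleton_eq_map
    (fun b_id => user_id.foldl (fun temp u_id =>
      if PySem.Str.len b_id == PySem.Str.len u_id && isSame b_id.toList u_id.toList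
      then temp ++ [u_id] else temp) []) banned_id []]
  simp only [List.nil_append]
  congr 1
  funext b
  have := PySem.List.foldl_append_if
    (fun u : String => PySem.Str.len b == PySem.Str.len u && isSame b.toList u.toList)
    (fun u => u) user_id []
  simp only [List.nil_append, List.map_id'] at this
  rw [this]
  congr 1
  funext u
  rw [isSame_eq_matchWild, Bool.beq_comm]

-- ===== VERDICT (by name: the statement is the Claim_ definition above) =====
theorem solution_spec : Claim_equal_solution := by
  intro user_id banned_id _
  unfold Spec_solution solution solution_alt
  dsimp only
  rw [able_eq]
  generalize (banned_id.map (fun b =>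
    user_id.filter (fun u => PySem.Str.len u == PySem.Str.len b && matchWild b.toList u.toList))) = able
  rw [pickId_eq_leaves able able 0 [] [] (by simp) (fun _ => rfl)]
  rw [foldl_step_eq_flatMap_leaves able [[]]]
  simp only [List.flatMap_cons, List.flatMap_nil, List.append_nil]
  rw [foldl_insS_eq_ofList]
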